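-- pv_equiv track=rewrite | github.com/glaucomori/Data_Science | Challenges/challenge01.py | ultima_parada
-- ===== SOURCE A (Python) =====
-- def ultima_parada(combustivel,consumo,postos_de_gasolina):
--     postos_de_gasolina_ordenados = sorted(postos_de_gasolina)
--     autonomia = combustivel * consumo
--     if autonomia < postos_de_gasolina_ordenados[0]:
--         return -1
--     elif autonomia > postos_de_gasolina_ordenados[-1]:
--         return postos_de_gasolina_ordenados[-1]
--     else:
--         for i in range(len(postos_de_gasolina)):
--             if autonomia >= postos_de_gasolina_ordenados[i]:
--                 continue
--             else:
--                 return postos_de_gasolina_ordenados[i-1]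
-- ===== SOURCE B (Python) =====
-- def ultima_parada(combustivel, consumo, postos_de_gasolina):
--     autonomia = combustivel * consumo
--     best = None
--     for p in postos_de_gasolina:
--         if p <= autonomia and (best is None or p > best):
--             best = p
--     return -1 if best is None else best
-- ===== Notes on version B (the rewrite author's own statement) =====
-- stated objective: faster
-- what changed: Replaced sort-then-linear-scan over the sorted list with a single unsorted pass tracking the largest station not exceeding the autonomy.
-- outside the precondition, e.g. on ultima_parada(1, 1, [1]): A returns None, B returns 1; on ultima_parada(1, 1, []): A raises IndexError, B returns -1
import Mathlib
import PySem

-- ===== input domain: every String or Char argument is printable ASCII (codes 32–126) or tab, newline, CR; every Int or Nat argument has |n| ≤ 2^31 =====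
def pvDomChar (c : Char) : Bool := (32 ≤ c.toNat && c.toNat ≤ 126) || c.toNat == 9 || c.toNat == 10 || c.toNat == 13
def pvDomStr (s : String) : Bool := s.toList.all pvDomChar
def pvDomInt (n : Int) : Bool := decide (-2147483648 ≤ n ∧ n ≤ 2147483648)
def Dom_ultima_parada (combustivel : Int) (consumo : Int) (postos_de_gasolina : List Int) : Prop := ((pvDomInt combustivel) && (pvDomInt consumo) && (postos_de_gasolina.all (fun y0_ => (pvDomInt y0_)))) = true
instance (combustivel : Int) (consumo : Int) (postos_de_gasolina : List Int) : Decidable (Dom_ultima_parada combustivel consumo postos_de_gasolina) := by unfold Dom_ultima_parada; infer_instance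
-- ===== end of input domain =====

-- B replaces A's sort-then-scan by a single pass tracking the largest station not exceeding the autonomy (objective: faster).


-- ===== PORT A =====
-- the 'for i in range(len(...))' loop of A; falling off the loop (Python returns None there) yields 0, excluded by Pre_
def pvALoop (s : List Int) (a : Int) (i : Nat) : Int :=
  if _h : i < s.length then
    if a ≥ PySem.List.pyGetD s (i : Int) 0 then pvALoop s a (i + 1)
    else PySem.List.pyGetD s ((i : Int) - 1) 0
  else 0
termination_by s.length - i

def ultima_parada (combustivel : Int) (consumo : Int) (postos_de_gasolina : List Int) : Int :=
  let s := PySem.List.sorted postos_de_gasolina (fun x => x) false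
  let autonomia := combustivel * consumo
  match PySem.List.pyGet? s 0, PySem.List.pyGet? s (-1) with
  | some first, some last =>
    if autonomia < first then -1
    else if autonomia > last then last
    else pvALoop s autonomia 0
  | _, _ => 0   -- empty list: Python raises IndexError (outside Pre_)

-- ===== PORT B =====
-- one step of B's single pass: keep the largest station not exceeding the autonomy
def pvBStep (a : Int) (b : Option Int) (p : Int) : Option Int :=
  match b with
  | none => if p ≤ a then some p else none
  | some best => if p ≤ a ∧ best < p then some p else some best

def ultima_parada_alt (combustivel : Int) (consumo : Int) (postos_de_gasolina : List Int) : Int :=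
  let autonomia := combustivel * consumo
  match postos_de_gasolina.foldl (pvBStep autonomia) none with
  | none => -1
  | some best => best

-- ===== PRECONDITION & SPEC =====
-- Pre_ excludes (i) the empty list, where A raises IndexError, and (ii) inputs whose autonomy equals the maximum
-- station, where A's loop completes without returning and A yields None, which is not an Int.
def Pre_ultima_parada (combustivel : Int) (consumo : Int) (postos_de_gasolina : List Int) : Prop :=
  postos_de_gasolina ≠ [] ∧
    (combustivel * consumo ∉ postos_de_gasolina ∨ ∃ x ∈ postos_de_gasolina, combustivel * consumo < x)
instance (combustivel : Int) (consumo : Int) (postos_de_gasolina : List Int) : Decidable (Pre_ultima_parada combustivel consumo postos_de_gasolina) := by unfold Pre_ultima_parada; infer_instance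
def pvWitness_ultima_parada : Int × Int × List Int := (6, 1, [3, 10])

def Spec_ultima_parada (combustivel : Int) (consumo : Int) (postos_de_gasolina : List Int) (out : Int) : Prop := out = ultima_parada_alt combustivel consumo postos_de_gasolina
instance (combustivel : Int) (consumo : Int) (postos_de_gasolina : List Int) (out : Int) : Decidable (Spec_ultima_parada combustivel consumo postos_de_gasolina out) := by unfold Spec_ultima_parada; infer_instance

-- ===== CLAIM (what is proved, stated in full; the proofs are below) =====
def Claim_equal_ultima_parada : Prop := ∀ (combustivel : Int) (consumo : Int) (postos_de_gasolina : List Int), Dom_ultima_parada combustivel consumo postos_de_gasolina → Pre_ultima_parada combustivel consumo postos_de_gasolina → Spec_ultima_parada combustivel consumo postos_de_gasolina (ultima_parada combustivel consumo postos_de_gasolina)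

-- ===== LEMMAS AND PROOFS =====

lemma foldB_some_spec (a : Int) (l : List Int) : ∀ (b : Option Int) (m : Int),
    l.foldl (pvBStep a) b = some m →
      (b = some m ∨ (m ∈ l ∧ m ≤ a)) ∧ (∀ x, b = some x → x ≤ m) ∧ ∀ p ∈ l, p ≤ a → p ≤ m := by
  induction l with
  | nil => intro b m h; simp_all
  | cons p t ih =>
    intro b m h
    rw [List.foldl_cons] at h
    obtain ⟨h1, h2, h3⟩ := ih (pvBStep a b p) m h
    have hstep : ∀ x, pvBStep a b p = some x → x ≤ m := h2
    cases b with
    | none =>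
      by_cases hp : p ≤ a
      · have hb' : pvBStep a none p = some p := by simp [pvBStep, hp]
        have hpm : p ≤ m := hstep p hb'
        refine ⟨?_, by simp, ?_⟩
        · rcases h1 with h1 | h1
          · rw [hb'] at h1; injection h1 with h1; subst h1
            exact Or.inr ⟨List.mem_cons_self, hp⟩
          · exact Or.inr ⟨List.mem_cons_of_mem _ h1.1, h1.2⟩
        · intro q hq hqa
          rcases List.mem_cons.mp hq with rfl | hq
          · exact hpm
          · exact h3 q hq hqa
      · have hb' : pvBStep a none p = none := by simp [pvBStep, hp]
        refine ⟨?_, by simp, ?_⟩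
        · rcases h1 with h1 | h1
          · rw [hb'] at h1; exact absurd h1 (by simp)
          · exact Or.inr ⟨List.mem_cons_of_mem _ h1.1, h1.2⟩
        · intro q hq hqa
          rcases List.mem_cons.mp hq with rfl | hq
          · exact absurd hqa hp
          · exact h3 q hq hqa
    | some x =>
      by_cases hp : p ≤ a ∧ x < p
      · have hb' : pvBStep a (some x) p = some p := by simp [pvBStep, hp]
        have hpm : p ≤ m := hstep p hb'
        refine ⟨?_, ?_, ?_⟩
        · rcases h1 with h1 | h1
          · rw [hb'] at h1; injection h1 with h1; subst h1
            exact Or.inr ⟨List.mem_cons_self, hp.1⟩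
          · exact Or.inr ⟨List.mem_cons_of_mem _ h1.1, h1.2⟩
        · intro y hy
          injection hy with hxy
          omega
        · intro q hq hqa
          rcases List.mem_cons.mp hq with rfl | hq
          · exact hpm
          · exact h3 q hq hqa
      · have hb' : pvBStep a (some x) p = some x := by simp only [pvBStep, if_neg hp]
        have hxm : x ≤ m := hstep x hb'
        refine ⟨?_, ?_, ?_⟩
        · rcases h1 with h1 | h1
          · rw [hb'] at h1; exact Or.inl h1
          · exact Or.inr ⟨List.mem_cons_of_mem _ h1.1, h1.2⟩
        · intro y hy
          injection hy with hxy
          omega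
        · intro q hq hqa
          rcases List.mem_cons.mp hq with rfl | hq
          · omega
          · exact h3 q hq hqa

lemma foldB_none_iff (a : Int) (l : List Int) : ∀ b : Option Int,
    l.foldl (pvBStep a) b = none ↔ b = none ∧ ∀ p ∈ l, ¬ p ≤ a := by
  induction l with
  | nil => simp
  | cons p t ih =>
    intro b
    rw [List.foldl_cons, ih]
    constructor
    · rintro ⟨h1, h2⟩
      cases b with
      | none =>
        simp only [pvBStep] at h1
        split at h1 <;> simp_all
      | some x => simp only [pvBStep] at h1; split at h1 <;> simp_all
    · rintro ⟨rfl, h2⟩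
      have hp := h2 p (by simp)
      refine ⟨by simp [pvBStep, hp], fun q hq => h2 q (by simp [hq])⟩

lemma alt_eq_max (c k : Int) (l : List Int) :
    ultima_parada_alt c k l = ((l.filter (fun p => p ≤ c * k)).max?).getD (-1) := by
  show (match l.foldl (pvBStep (c * k)) none with | none => -1 | some best => best) = _
  cases hf : l.foldl (pvBStep (c * k)) none with
  | none =>
    have h := (foldB_none_iff (c * k) l none).mp hf
    have : l.filter (fun p => p ≤ c * k) = [] := by
      rw [List.filter_eq_nil_iff]; intro p hp; simpa using h.2 p hp
    simp [this]
  | some m =>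
    obtain ⟨h1, _, h3⟩ := foldB_some_spec (c * k) l none m hf
    have hm : m ∈ l ∧ m ≤ c * k := by
      rcases h1 with h1 | h1
      · exact absurd h1 (by simp)
      · exact h1
    have : (l.filter (fun p => p ≤ c * k)).max? = some m := by
      rw [List.max?_eq_some_iff]
      refine ⟨List.mem_filter.mpr ⟨hm.1, by simpa using hm.2⟩, ?_⟩
      intro b hb
      obtain ⟨hbl, hba⟩ := List.mem_filter.mp hb
      exact h3 b hbl (by simpa using hba)
    simp [this]

lemma max?_of_perm (l₁ l₂ : List Int) (h : l₁.Perm l₂) : l₁.max? = l₂.max? := by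
  cases h2 : l₂.max? with
  | none =>
    rw [List.max?_eq_none_iff] at h2 ⊢
    subst h2; exact List.Perm.eq_nil h
  | some m =>
    rw [List.max?_eq_some_iff] at h2 ⊢
    exact ⟨h.mem_iff.mpr h2.1, fun b hb => h2.2 b (h.mem_iff.mp hb)⟩

lemma le_getLast_of_pairwise (s : List Int) (hp : s.Pairwise (· ≤ ·)) (h : s ≠ []) :
    ∀ x ∈ s, x ≤ s.getLast h := by
  induction s with
  | nil => simp at h
  | cons y t ih =>
    intro x hx
    rcases List.mem_cons.mp hx with rfl | hx
    · cases t with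
      | nil => simp
      | cons z u =>
        rw [List.getLast_cons (by simp)]
        exact (List.pairwise_cons.mp hp).1 _ (List.getLast_mem _)
    · cases t with
      | nil => simp at hx
      | cons z u =>
        rw [List.getLast_cons (by simp)]
        exact ih (List.pairwise_cons.mp hp).2 (by simp) x hx

lemma filter_eq_takeWhile_of_pairwise (a : Int) (s : List Int) (hp : s.Pairwise (· ≤ ·)) :
    s.filter (fun p => p ≤ a) = s.takeWhile (fun p => p ≤ a) := by
  induction s with
  | nil => simp
  | cons y t ih =>
    obtain ⟨hy, ht⟩ := List.pairwise_cons.mp hp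
    by_cases h : y ≤ a
    · simp only [List.filter_cons, List.takeWhile_cons, decide_eq_true h, if_pos, ih ht]
    · have hft : List.filter (fun p => decide (p ≤ a)) t = [] :=
        List.filter_eq_nil_iff.mpr fun x hx => by
          simpa using fun hxa => h (le_trans (hy x hx) hxa)
      simp [h, hft]

lemma pvALoop_run (s : List Int) (a : Int)
    (hlt : (s.takeWhile (fun p => p ≤ a)).length < s.length) :
    ∀ i, i ≤ (s.takeWhile (fun p => p ≤ a)).length →
      pvALoop s a i = PySem.List.pyGetD s (((s.takeWhile (fun p => p ≤ a)).length : Int) - 1) 0 := by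
  set tw := s.takeWhile (fun p => p ≤ a) with htw
  intro i hi
  induction hn : tw.length - i using Nat.strong_induction_on generalizing i with
  | _ n ih =>
  have hi' : i < s.length := lt_of_le_of_lt hi hlt
  rw [pvALoop, dif_pos hi']
  have hget : PySem.List.pyGetD s (i : Int) 0 = s[i] := by
    rw [PySem.List.pyGetD_natCast]; exact List.getD_eq_getElem s 0 hi'
  rcases lt_or_eq_of_le hi with hlt2 | rfl
  · -- i < tw.length : the element is in the prefix, a ≥ it, recurse
    have hmem : s[i] = tw[i]'hlt2 := (List.IsPrefix.getElem (List.takeWhile_prefix _) hlt2).symm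
    have hple : a ≥ s[i] := by
      have := List.mem_takeWhile_imp (p := fun p => decide (p ≤ a)) (l := s) (List.getElem_mem hlt2)
      rw [hmem]; simpa using this
    rw [hget, if_pos hple]
    exact ih (tw.length - (i + 1)) (by omega) (i + 1) (by omega) rfl
  · -- i = tw.length : first failing element, return s[i-1]
    have hdr : s.dropWhile (fun p => decide (p ≤ a)) ≠ [] := by
      intro hnil
      have h2 := List.takeWhile_append_dropWhile (p := fun p => decide (p ≤ a)) (l := s)
      rw [hnil, List.append_nil] at h2
      have : tw.length = s.length := by rw [htw, h2]
      omega
    have hsi : s[tw.length] = (s.dropWhile (fun p => decide (p ≤ a))).head hdr := by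
      have h0 : s[tw.length]? = some ((s.dropWhile (fun p => decide (p ≤ a))).head hdr) := by
        conv_lhs => rw [← List.takeWhile_append_dropWhile (p := fun p => decide (p ≤ a)) (l := s)]
        rw [List.getElem?_append_right (le_of_eq (by rw [htw]))]
        simp [htw, List.head_eq_getElem]
      have h1 : s[tw.length]? = some s[tw.length] := List.getElem?_eq_getElem hi'
      rw [h0] at h1
      exact (Option.some.inj h1).symm
    have hfail : ¬ (a ≥ s[tw.length]) := by
      have := List.head_dropWhile_not (p := fun p => decide (p ≤ a)) (l := s) hdr
      rw [← hsi] at this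
      simpa using this
    rw [hget, if_neg hfail]

lemma ultima_parada_eq_alt (c k : Int) (l : List Int) (hl : l ≠ [])
    (hpre : (c * k) ∉ l ∨ ∃ x ∈ l, c * k < x) :
    ultima_parada c k l = ultima_parada_alt c k l := by
  rw [alt_eq_max]
  set a := c * k with ha
  set s := PySem.List.sorted l (fun x => x) false with hsdef
  have hperm : s.Perm l := PySem.List.sorted_perm l (fun x => x) false
  have hpair : s.Pairwise (· ≤ ·) := PySem.List.sorted_pairwise l (fun x => x)
  have hsne : s ≠ [] := by
    intro h
    have hp2 := hperm
    rw [h] at hp2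
    exact hl hp2.symm.eq_nil
  obtain ⟨hd, tl, hs⟩ := List.exists_cons_of_ne_nil hsne
  have hlast := List.getLast?_eq_some_getLast hsne
  have hmax_last : ∀ x ∈ l, x ≤ s.getLast hsne := by
    intro x hx
    exact le_getLast_of_pairwise s hpair hsne x (hperm.mem_iff.mpr hx)
  have hhd : ∀ x ∈ l, hd ≤ x := by
    intro x hx
    have hxs : x ∈ s := hperm.mem_iff.mpr hx
    rw [hs] at hxs hpair
    rcases List.mem_cons.mp hxs with rfl | hxs
    · exact le_refl x
    · exact (List.pairwise_cons.mp hpair).1 x hxs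
  unfold ultima_parada
  show (match PySem.List.pyGet? s 0, PySem.List.pyGet? s (-1) with
    | some first, some last =>
      if a < first then -1
      else if a > last then last
      else pvALoop s a 0
    | _, _ => 0) = _
  rw [PySem.List.pyGet?_neg_one, hlast]
  have h0 : PySem.List.pyGet? s 0 = some hd := by rw [hs]; exact PySem.List.pyGet?_zero_cons _ _
  rw [h0]
  simp only []
  by_cases hb1 : a < hd
  · rw [if_pos hb1]
    have : l.filter (fun p => p ≤ a) = [] := List.filter_eq_nil_iff.mpr fun x hx => by
      have h1 := hhd x hx
      simp only [decide_eq_true_eq]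
      omega
    simp [this]
  · rw [if_neg hb1]
    by_cases hb2 : a > s.getLast hsne
    · rw [if_pos hb2]
      have hfl : l.filter (fun p => p ≤ a) = l :=
        List.filter_eq_self.mpr fun x hx => by simpa using le_trans (hmax_last x hx) (by omega)
      have : (l.filter (fun p => p ≤ a)).max? = some (s.getLast hsne) := by
        rw [hfl, List.max?_eq_some_iff]
        exact ⟨hperm.mem_iff.mp (List.getLast_mem hsne), hmax_last⟩
      simp [this]
    · rw [if_neg hb2]
      -- hd ≤ a ≤ last, and Pre_ gives a < last
      have halast : a < s.getLast hsne := by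
        rcases hpre with hnm | ⟨x, hx, hax⟩
        · rcases lt_or_eq_of_le (not_lt.mp hb2) with h | h
          · exact h
          · refine absurd (hperm.mem_iff.mp ?_) hnm
            rw [h]
            exact List.getLast_mem hsne
        · exact lt_of_lt_of_le hax (hmax_last x hx)
      set tw := s.takeWhile (fun p => p ≤ a) with htw
      have htwpre : tw <+: s := List.takeWhile_prefix _
      have htwlt : tw.length < s.length := by
        rcases lt_or_eq_of_le htwpre.length_le with h | h
        · exact h
        · exfalso
          have : tw = s := htwpre.eq_of_length h
          have hmem : s.getLast hsne ∈ tw := by rw [this]; exact List.getLast_mem hsne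
          have := List.mem_takeWhile_imp hmem
          simp at this
          omega
      have htwne : tw ≠ [] := by
        rw [htw, hs, List.takeWhile_cons]
        simp [show hd ≤ a from not_lt.mp hb1]
      have h1le : 1 ≤ tw.length := List.length_pos_of_ne_nil htwne
      have hrun := pvALoop_run s a htwlt 0 (by omega)
      rw [hrun]
      have hidx : ((tw.length : Int) - 1) = ((tw.length - 1 : Nat) : Int) := by omega
      have hlt1 : tw.length - 1 < s.length := by omega
      have hlt1' : tw.length - 1 < tw.length := by omega
      have hval : PySem.List.pyGetD s ((tw.length : Int) - 1) 0 = tw.getLast htwne := by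
        rw [hidx, PySem.List.pyGetD_natCast, List.getD_eq_getElem s 0 hlt1]
        exact ((List.IsPrefix.getElem htwpre hlt1').symm).trans (List.getLast_eq_getElem htwne).symm
      rw [hval]
      have htwpair : tw.Pairwise (· ≤ ·) := hpair.sublist (List.takeWhile_sublist _)
      have hmaxtw : (l.filter (fun p => p ≤ a)).max? = some (tw.getLast htwne) := by
        rw [max?_of_perm _ _ ((hperm.filter _).symm), filter_eq_takeWhile_of_pairwise a s hpair, ← htw]
        rw [List.max?_eq_some_iff]
        exact ⟨List.getLast_mem htwne, le_getLast_of_pairwise tw htwpair htwne⟩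
      simp [hmaxtw]

-- ===== VERDICT (by name: the statement is the Claim_ definition above) =====
theorem ultima_parada_spec : Claim_equal_ultima_parada :=
  fun c k l _ hpre => ultima_parada_eq_alt c k l hpre.1 hpre.2
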